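-- pv_equiv track=rewrite | github.com/simon816/Advent-of-Code-2022 | 17/part2.py | solidify
-- ===== SOURCE A (Python) =====
-- def solidify(row):
--     is_full = True
--     for i in range(len(row)):
--         if row[i] == '@':
--             row[i] = '#'
--         if is_full and row[i] != '#':
--             is_full = False
--     return is_full
-- ===== SOURCE B (Python) =====
-- def solidify(row):
--     # count cells that can never be solid ('@' becomes '#', so only those two count)
--     holes = sum(1 for c in row if c != '@' and c != '#')
--     for i in range(len(row)):
--         if row[i] == '@':
--             row[i] = '#'
--     return holes == 0
-- ===== Notes on version B (the rewrite author's own statement) =====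
-- stated objective: alternative
-- what changed: Instead of a fused replacement loop carrying an is_full flag, B counts the 'holes' (cells that are neither '@' nor '#') on the original row, does the in-place '@'->'#' replacement in a separate pass, and returns holes == 0.
import Mathlib
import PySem

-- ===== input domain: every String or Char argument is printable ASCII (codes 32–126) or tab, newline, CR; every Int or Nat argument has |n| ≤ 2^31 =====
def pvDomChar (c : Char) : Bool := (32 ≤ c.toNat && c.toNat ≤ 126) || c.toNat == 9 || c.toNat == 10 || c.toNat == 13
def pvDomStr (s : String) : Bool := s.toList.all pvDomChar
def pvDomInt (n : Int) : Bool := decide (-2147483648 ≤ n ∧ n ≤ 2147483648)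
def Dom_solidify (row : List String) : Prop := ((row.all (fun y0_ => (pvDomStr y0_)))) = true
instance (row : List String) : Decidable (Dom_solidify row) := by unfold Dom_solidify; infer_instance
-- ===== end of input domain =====

-- Both Pythons mutate `row` in place ('@' -> '#'); the equivalence proved here is about the
-- RETURN value only (B performs the same mutation). B replaces A's fused flag-carrying loop
-- by a counting pass over the ORIGINAL row (cells that are neither '@' nor '#') plus a
-- separate replacement pass, returning holes == 0: an alternative decomposition, same cost.

-- ===== PORT A =====
-- A's loop: walk the row, replace '@' by '#', and drop the is_full flag on a non-'#' cell.
def solidify (row : List String) : Bool :=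
  row.foldl (fun is_full s =>
    let s' := if s == "@" then "#" else s
    if is_full && !(s' == "#") then false else is_full) true

-- ===== PORT B =====
-- B: count the holes of the original row, then do the replacement pass (in-place mutation
-- in Python; it does not affect the return value), then return holes == 0.
def solidify_alt (row : List String) : Bool :=
  let holes : Int := row.foldl (fun n s => if s != "@" && s != "#" then n + 1 else n) 0
  let _row' := row.map (fun s => if s == "@" then "#" else s)  -- the replacement pass (mutation)
  holes == 0

-- ===== PRECONDITION & SPEC =====
def Spec_solidify (row : List String) (out : Bool) : Prop := out = solidify_alt row
instance (row : List String) (out : Bool) : Decidable (Spec_solidify row out) := by unfold Spec_solidify; infer_instance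

-- ===== CLAIM (what is proved, stated in full; the proofs are below) =====
def Claim_equal_solidify : Prop := ∀ (row : List String), Dom_solidify row → Spec_solidify row (solidify row)

-- ===== LEMMAS AND PROOFS =====
-- A's fold from flag b computes: b AND "no cell is a hole".
theorem solidify_fold_eq (row : List String) (b : Bool) :
    row.foldl (fun is_full s =>
      let s' := if s == "@" then "#" else s
      if is_full && !(s' == "#") then false else is_full) b
    = (b && row.all (fun s => (s == "@") || (s == "#"))) := by
  induction row generalizing b with
  | nil => simp
  | cons s rest ih =>
    simp only [List.foldl_cons, List.all_cons, ih]
    by_cases h1 : s = "@"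
    · subst h1; cases b <;> simp
    · by_cases h2 : s = "#" <;> cases b <;> simp [h1, h2]

-- B's counting fold from n adds the number of holes.
theorem holes_fold_eq (row : List String) (n : Int) :
    row.foldl (fun n s => if s != "@" && s != "#" then n + 1 else n) n
    = n + (row.countP (fun s => s != "@" && s != "#") : Int) := by
  induction row generalizing n with
  | nil => simp
  | cons s rest ih =>
    simp only [List.foldl_cons, List.countP_cons, ih]
    split_ifs <;> push_cast <;> ring

-- ===== VERDICT (by name: the statement is the Claim_ definition above) =====
theorem solidify_spec : Claim_equal_solidify := by
  intro row _
  unfold Spec_solidify solidify solidify_alt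
  rw [solidify_fold_eq, Bool.true_and, holes_fold_eq]
  simp only [zero_add]
  rw [Bool.eq_iff_iff]
  simp only [List.all_eq_true, Bool.or_eq_true, beq_iff_eq, Int.natCast_eq_zero,
    List.countP_eq_zero, Bool.and_eq_true, bne_iff_ne, ne_eq]
  constructor
  · intro h s hs hc; rcases h s hs with h1 | h1 <;> simp [h1] at hc
  · intro h s hs; by_cases h1 : s = "@"
    · exact Or.inl h1
    · by_cases h2 : s = "#"
      · exact Or.inr h2
      · exact absurd ⟨h1, h2⟩ (h s hs)
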